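-- pv_equiv track=rewrite | github.com/junhaz4/leetcode-notes | OA&Interview/mckinsey.py | calculateAmount
-- ===== SOURCE A (Python) =====
-- def calculateAmount(prices):
--   res = prices[0]
--   min_price = prices[0]
--   for i in range(1,len(prices)):
--     if prices[i] - min_price > 0:
--       res += prices[i] - prices[i-1]
--     else:
--       res += max(0, prices[i]-min_price)
--     min_price = min(min_price,prices[i])
--   return res
-- ===== SOURCE B (Python) =====
-- def calculateAmount(prices):
--     res = prices[0]
--     mins = []
--     m = prices[0]
--     for p in prices:
--         if p < m:
--             m = p
--         mins.append(m)
--     for prev, cur, pm in zip(prices, prices[1:], mins):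
--         if cur > pm:
--             res += cur - prev
--     return res
-- ===== Notes on version B (the rewrite author's own statement) =====
-- stated objective: alternative
-- what changed: B replaces A's single stateful index loop (running min + branch with max(0,...)) by two passes: it first materialises a prefix-minimum table, then sums the consecutive differences over zip(prices, prices[1:], mins) whenever the current price exceeds the prefix minimum.
import Mathlib
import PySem

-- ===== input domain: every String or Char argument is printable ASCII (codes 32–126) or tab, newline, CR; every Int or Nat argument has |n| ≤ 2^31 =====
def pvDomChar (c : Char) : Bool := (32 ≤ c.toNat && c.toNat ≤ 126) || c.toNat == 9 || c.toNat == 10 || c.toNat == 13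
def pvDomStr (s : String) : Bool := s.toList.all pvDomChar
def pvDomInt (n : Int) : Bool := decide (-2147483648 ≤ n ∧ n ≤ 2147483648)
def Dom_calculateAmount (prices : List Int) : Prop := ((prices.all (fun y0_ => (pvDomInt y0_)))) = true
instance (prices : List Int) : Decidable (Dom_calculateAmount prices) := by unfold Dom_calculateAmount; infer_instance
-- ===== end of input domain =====

-- B builds a prefix-minimum table and then one zip pass over consecutive pairs (alternative decomposition, same cost).

-- ===== PORT A =====
def calculateAmount (prices : List Int) : Int :=
  match prices with
  | [] => 0  -- Python raises IndexError here; excluded by Pre_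
  | p0 :: _ =>
    ((PySem.List.pyRange 1 (PySem.List.len prices) 1).foldl
      (fun (s : Int × Int) i =>
        (if PySem.List.pyGetD prices i 0 - s.2 > 0 then
            s.1 + (PySem.List.pyGetD prices i 0 - PySem.List.pyGetD prices (i - 1) 0)
          else
            s.1 + max 0 (PySem.List.pyGetD prices i 0 - s.2),
         min s.2 (PySem.List.pyGetD prices i 0))) (p0, p0)).1

-- ===== PORT B =====
def calculateAmount_alt (prices : List Int) : Int :=
  match prices with
  | [] => 0  -- Python raises IndexError here; excluded by Pre_
  | p0 :: _ =>
    let mins := (prices.foldl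
      (fun (acc : List Int × Int) p =>
        let m := if p < acc.2 then p else acc.2
        (acc.1 ++ [m], m)) (([] : List Int), p0)).1
    (prices.zip ((PySem.List.slice prices (some 1) none).zip mins)).foldl
      (fun res x => if x.2.1 > x.2.2 then res + (x.2.1 - x.1) else res) p0

-- ===== PRECONDITION & SPEC =====
-- Pre_ excludes only the empty list, on which the Python A raises IndexError (prices[0]).
def Pre_calculateAmount (prices : List Int) : Prop := prices ≠ []
instance (prices : List Int) : Decidable (Pre_calculateAmount prices) := by unfold Pre_calculateAmount; infer_instance
def pvWitness_calculateAmount : List Int := [3, 1, 4, 2]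

def Spec_calculateAmount (prices : List Int) (out : Int) : Prop := out = calculateAmount_alt prices
instance (prices : List Int) (out : Int) : Decidable (Spec_calculateAmount prices out) := by unfold Spec_calculateAmount; infer_instance

-- ===== CLAIM (what is proved, stated in full; the proofs are below) =====
def Claim_equal_calculateAmount : Prop := ∀ (prices : List Int), Dom_calculateAmount prices → Pre_calculateAmount prices → Spec_calculateAmount prices (calculateAmount prices)

-- ===== LEMMAS AND PROOFS =====

-- Common structural recursion both ports are reduced to: state (res, running min, previous price).
def goA (res m prev : Int) : List Int → Int
  | [] => res
  | p :: t => goA (if p - m > 0 then res + (p - prev) else res + max 0 (p - m)) (min m p) p t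

-- Prefix minima of the tail, seeded with m.
def minsOf (m : Int) : List Int → List Int
  | [] => []
  | p :: t => (if p < m then p else m) :: minsOf (if p < m then p else m) t

lemma mins_build (l : List Int) : ∀ (acc : List Int) (m : Int),
    (l.foldl (fun (acc : List Int × Int) p =>
      let m := if p < acc.2 then p else acc.2
      (acc.1 ++ [m], m)) (acc, m)).1 = acc ++ minsOf m l := by
  induction l with
  | nil => intro acc m; simp [minsOf]
  | cons p t ih => intro acc m; simp only [List.foldl_cons, minsOf, ih]; simp

lemma goA_eq_zip (tail : List Int) : ∀ (prev m res : Int),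
    goA res m prev tail =
      ((prev :: tail).zip (tail.zip (m :: minsOf m tail))).foldl
        (fun res x => if x.2.1 > x.2.2 then res + (x.2.1 - x.1) else res) res := by
  induction tail with
  | nil => intro prev m res; simp [goA]
  | cons p t ih =>
    intro prev m res
    simp only [minsOf, goA, List.zip_cons_cons, List.foldl_cons]
    have hmin : min m p = if p < m then p else m := by split_ifs <;> omega
    have hres : (if p - m > 0 then res + (p - prev) else res + max 0 (p - m))
        = (if p > m then res + (p - prev) else res) := by split_ifs <;> omega
    rw [hmin, hres]
    exact ih p (if p < m then p else m) _

lemma Abridge (tail : List Int) : ∀ (pre : List Int) (res m : Int) (hpre : pre ≠ []),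
    ((PySem.List.pyRange (pre.length : Int) ((pre.length : Int) + (tail.length : Int)) 1).foldl
      (fun (s : Int × Int) i =>
        (if PySem.List.pyGetD (pre ++ tail) i 0 - s.2 > 0 then
            s.1 + (PySem.List.pyGetD (pre ++ tail) i 0 - PySem.List.pyGetD (pre ++ tail) (i - 1) 0)
          else
            s.1 + max 0 (PySem.List.pyGetD (pre ++ tail) i 0 - s.2),
         min s.2 (PySem.List.pyGetD (pre ++ tail) i 0))) (res, m)).1
    = goA res m (pre.getLast hpre) tail := by
  induction tail with
  | nil =>
    intro pre res m hpre
    rw [PySem.List.pyRange_one_eq_nil (by simp)]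
    simp [goA]
  | cons p t ih =>
    intro pre res m hpre
    have hlen : 1 ≤ pre.length := Nat.one_le_iff_ne_zero.mpr (by simpa using hpre)
    rw [PySem.List.pyRange_one_cons (by simp)]
    have h1 : PySem.List.pyGetD (pre ++ p :: t) (pre.length : Int) 0 = p := by
      simp [PySem.List.pyGetD_natCast, List.getD]
    have hcast : (pre.length : Int) - 1 = ((pre.length - 1 : Nat) : Int) := by push_cast [hlen]; ring
    have h2 : PySem.List.pyGetD (pre ++ p :: t) ((pre.length : Int) - 1) 0 = pre.getLast hpre := by
      rw [hcast, PySem.List.pyGetD_natCast]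
      have hl : pre.length - 1 < pre.length := by omega
      rw [List.getD, List.getElem?_append_left (by omega)]
      simp [List.getElem?_eq_getElem hl, List.getLast_eq_getElem]
    simp only [List.foldl_cons, h1, h2]
    have happ : pre ++ p :: t = (pre ++ [p]) ++ t := by simp
    have hlast : (pre ++ [p]).getLast (by simp) = p := by simp
    have hstart : (pre.length : Int) + 1 = (((pre ++ [p]).length : Nat) : Int) := by simp
    have hstop : (pre.length : Int) + ((p :: t).length : Int) = (((pre ++ [p]).length : Nat) : Int) + (t.length : Int) := by
      simp; ring
    rw [happ, hstart, hstop, ih (pre ++ [p]) _ _ (by simp)]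
    simp [goA, hlast]

lemma main_eq (p0 : Int) (rest : List Int) :
    calculateAmount (p0 :: rest) = calculateAmount_alt (p0 :: rest) := by
  have hA : calculateAmount (p0 :: rest) = goA p0 p0 p0 rest := by
    show ((PySem.List.pyRange 1 (PySem.List.len (p0 :: rest)) 1).foldl _ (p0, p0)).1 = _
    have hb : PySem.List.len (p0 :: rest) = ((([p0] : List Int).length : Int) + (rest.length : Int)) := by
      simp [PySem.List.len_eq]; ring
    have hone : (1 : Int) = ((([p0] : List Int).length : Nat) : Int) := by simp
    rw [hb, hone]
    have := Abridge rest [p0] p0 p0 (by simp)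
    simpa using this
  have hB : calculateAmount_alt (p0 :: rest) = goA p0 p0 p0 rest := by
    show ((p0 :: rest).zip ((PySem.List.slice (p0 :: rest) (some 1) none).zip
        (((p0 :: rest).foldl (fun (acc : List Int × Int) p =>
          let m := if p < acc.2 then p else acc.2
          (acc.1 ++ [m], m)) (([] : List Int), p0)).1))).foldl
        (fun res x => if x.2.1 > x.2.2 then res + (x.2.1 - x.1) else res) p0 = _
    rw [mins_build, PySem.List.slice_from_one]
    have hm : minsOf p0 (p0 :: rest) = p0 :: minsOf p0 rest := by
      simp [minsOf]
    rw [hm]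
    simp only [List.nil_append, List.tail_cons]
    exact (goA_eq_zip rest p0 p0 p0).symm
  rw [hA, hB]

-- ===== VERDICT (by name: the statement is the Claim_ definition above) =====
theorem calculateAmount_spec : Claim_equal_calculateAmount := by
  intro prices _ hpre
  unfold Spec_calculateAmount
  cases prices with
  | nil => exact absurd rfl hpre
  | cons p0 rest => exact main_eq p0 rest
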